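-- pv_equiv track=rewrite | github.com/Dessia-tech/volmdlr | volmdlr/wires.py | clean_sewing_closing_pairs_dictionary
-- ===== SOURCE A (Python) =====
-- def clean_sewing_closing_pairs_dictionary(dict_closing_pairs,
--                                           closing_point_index,
--                                           passed_by_zero_index):
--     """
--     Cleans the dictionary containing the sewing closing pairs information.
--
--     In case it needs to be recalculated due to changing closing points.
--     """
--     dict_closing_pairs_values = list(dict_closing_pairs.values())
--     dict_closing_pairs_keys = list(dict_closing_pairs.keys())
--     previous_closing_point_index = dict_closing_pairs_values[-1][1]
--     last_dict_value = previous_closing_point_index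
--     for i, key in enumerate(dict_closing_pairs_keys[::-1]):
--         if (not passed_by_zero_index and
--             last_dict_value > closing_point_index) or \
--                 (passed_by_zero_index and
--                  0 <= last_dict_value <= previous_closing_point_index and
--                  last_dict_value > closing_point_index):
--             lower_bounddary_closing_point = key
--             del dict_closing_pairs[key]
--             if not dict_closing_pairs:
--                 break
--             last_dict_value = dict_closing_pairs_values[-i - 2][1]
--
--     return dict_closing_pairs, lower_bounddary_closing_point
-- ===== SOURCE B (Python) =====
-- def clean_sewing_closing_pairs_dictionary(dict_closing_pairs,
--                                           closing_point_index,
--                                           passed_by_zero_index):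
--     """Forward single pass: each step of the original backward scan tests the
--     value of the very entry it is about to delete, so the deleted tail starts
--     right after the LAST entry whose own value fails the condition.  One
--     forward pass records that position; the tail after it is then removed."""
--     items = list(dict_closing_pairs.items())
--     prev = items[-1][1][1]
--     keep = 0
--     for i, (_, value) in enumerate(items):
--         s = value[1]
--         if not (s > closing_point_index and
--                 (not passed_by_zero_index or 0 <= s <= prev)):
--             keep = i + 1
--     lower_bounddary_closing_point = items[keep][0]
--     for key, _ in items[keep:]:
--         del dict_closing_pairs[key]
--     return dict_closing_pairs, lower_bounddary_closing_point
-- ===== Notes on version B (the rewrite author's own statement) =====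
-- stated objective: alternative
-- what changed: A scans the entries backward with enumerate(keys[::-1]), deleting inline while re-indexing a frozen values snapshot with -i-2 arithmetic; B exploits that each backward step tests the value of the entry it deletes, so a single FORWARD pass records the position after the last failing value and the tail after it is sliced off in one go - opposite traversal direction, no index arithmetic, no interleaved mutation.
import Mathlib
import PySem

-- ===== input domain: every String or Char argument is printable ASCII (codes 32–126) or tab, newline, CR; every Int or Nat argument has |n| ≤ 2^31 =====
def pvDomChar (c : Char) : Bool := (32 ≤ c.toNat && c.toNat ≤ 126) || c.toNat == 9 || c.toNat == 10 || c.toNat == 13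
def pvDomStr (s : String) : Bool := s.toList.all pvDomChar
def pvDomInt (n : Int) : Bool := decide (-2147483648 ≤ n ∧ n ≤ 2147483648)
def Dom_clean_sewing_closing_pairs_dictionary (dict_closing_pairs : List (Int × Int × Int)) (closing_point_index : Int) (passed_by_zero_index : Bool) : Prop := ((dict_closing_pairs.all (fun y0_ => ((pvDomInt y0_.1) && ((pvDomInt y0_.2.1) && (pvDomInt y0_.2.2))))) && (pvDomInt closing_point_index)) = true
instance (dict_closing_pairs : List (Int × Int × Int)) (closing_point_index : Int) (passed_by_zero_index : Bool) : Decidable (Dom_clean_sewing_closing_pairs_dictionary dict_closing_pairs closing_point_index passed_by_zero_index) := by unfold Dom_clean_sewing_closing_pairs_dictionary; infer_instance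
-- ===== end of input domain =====

-- B replaces A's backward delete-while-scanning loop over the reversed key snapshot by one
-- FORWARD pass that records the position after the last failing value, then slices the tail off
-- (same deletions, same returned pair; B mutates the dict like A).

-- ===== PORT A =====

-- `del d[key]` on an assoc-list dict: removes the (unique, present inside Pre_) entry with that key.
def pvDelKey : List (Int × Int × Int) → Int → List (Int × Int × Int)
  | [], _ => []
  | kv :: rest, k => if kv.1 = k then rest else kv :: pvDelKey rest k

-- the `for i, key in enumerate(keys[::-1])` loop of A, as structural recursion on the reversed keys;
-- once the condition is false the state never changes again (as in A, which keeps iterating idly).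
def pvAloop (vals : List (Int × Int)) (prev cpi : Int) (pbz : Bool) :
    Nat → List Int → List (Int × Int × Int) → Int → Option Int →
    List (Int × Int × Int) × Option Int
  | _, [], d, _, lower => (d, lower)
  | i, key :: rest, d, last, lower =>
    if (!pbz && decide (last > cpi)) ||
       (pbz && decide ((0:Int) ≤ last) && decide (last ≤ prev) && decide (last > cpi)) then
      let d' := pvDelKey d key
      if d' = [] then (d', some key)
      else
        -- values[-i-2][1]; the getD default is never used: the index is in range whenever d' ≠ []
        let last' := ((PySem.List.pyGet? vals (-(i : Int) - 2)).getD (0, 0)).2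
        pvAloop vals prev cpi pbz (i + 1) rest d' last' (some key)
    else pvAloop vals prev cpi pbz (i + 1) rest d last lower

def clean_sewing_closing_pairs_dictionary (dict_closing_pairs : List (Int × Int × Int)) (closing_point_index : Int) (passed_by_zero_index : Bool) : (List (Int × Int × Int)) × Int :=
  let vals := dict_closing_pairs.map (·.2)
  let keys := dict_closing_pairs.map (·.1)
  match PySem.List.pyGet? vals (-1) with
  | none => (dict_closing_pairs, 0)     -- Python: IndexError on an empty dict (excluded by Pre_)
  | some v =>
    let prev := v.2
    match pvAloop vals prev closing_point_index passed_by_zero_index 0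
        ((PySem.List.slice? keys none none (-1)).getD []) dict_closing_pairs prev none with
    | (d', none) => (d', 0)             -- Python: NameError, nothing was deleted (excluded by Pre_)
    | (d', some low) => (d', low)

-- ===== PORT B =====

-- B's per-entry condition: `s > closing_point_index and (not passed_by_zero_index or 0 <= s <= prev)`
def pvCond (cpi prev : Int) (pbz : Bool) (s : Int) : Bool :=
  decide (s > cpi) && (!pbz || (decide ((0:Int) ≤ s) && decide (s ≤ prev)))

-- one step of B's forward `for i, (_, value) in enumerate(items)` loop; state = (keep, i)
def pvKeepStep (cpi prev : Int) (pbz : Bool) (st : Nat × Nat) (s : Int) : Nat × Nat :=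
  if pvCond cpi prev pbz s then (st.1, st.2 + 1) else (st.2 + 1, st.2 + 1)

def clean_sewing_closing_pairs_dictionary_alt (dict_closing_pairs : List (Int × Int × Int)) (closing_point_index : Int) (passed_by_zero_index : Bool) : (List (Int × Int × Int)) × Int :=
  let items := dict_closing_pairs
  match PySem.List.pyGet? items (-1) with
  | none => (dict_closing_pairs, 0)     -- Python: IndexError on an empty dict (excluded by Pre_)
  | some it =>
    let prev := it.2.2
    let keep := (items.foldl (fun st kv =>
        pvKeepStep closing_point_index prev passed_by_zero_index st kv.2.2) (0, 0)).1
    match items[keep]? with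
    | none => (dict_closing_pairs, 0)   -- Python: IndexError when keep = n (excluded by Pre_)
    | some low =>
      ((items.drop keep).foldl (fun acc kv => pvDelKey acc kv.1) items, low.1)

-- ===== PRECONDITION & SPEC =====
-- Pre_ excludes (a) assoc-lists with duplicate keys, which do not represent a Python dict, and
-- (b) the inputs on which A raises: the empty dict (IndexError) and the inputs whose last value
-- fails the first-step condition, where no deletion happens and A raises NameError.
def Pre_clean_sewing_closing_pairs_dictionary (dict_closing_pairs : List (Int × Int × Int)) (closing_point_index : Int) (passed_by_zero_index : Bool) : Prop :=
  (dict_closing_pairs.map Prod.fst).Nodup ∧ dict_closing_pairs ≠ [] ∧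
  (dict_closing_pairs.getLastD (0, 0, 0)).2.2 > closing_point_index ∧
  (passed_by_zero_index = true → 0 ≤ (dict_closing_pairs.getLastD (0, 0, 0)).2.2)
instance (dict_closing_pairs : List (Int × Int × Int)) (closing_point_index : Int) (passed_by_zero_index : Bool) : Decidable (Pre_clean_sewing_closing_pairs_dictionary dict_closing_pairs closing_point_index passed_by_zero_index) := by unfold Pre_clean_sewing_closing_pairs_dictionary; infer_instance

def pvWitness_clean_sewing_closing_pairs_dictionary : (List (Int × Int × Int)) × Int × Bool :=
  ([(4, (0, 1)), (7, (1, 5))], 3, false)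

def Spec_clean_sewing_closing_pairs_dictionary (dict_closing_pairs : List (Int × Int × Int)) (closing_point_index : Int) (passed_by_zero_index : Bool) (out : (List (Int × Int × Int)) × Int) : Prop := out = clean_sewing_closing_pairs_dictionary_alt dict_closing_pairs closing_point_index passed_by_zero_index
instance (dict_closing_pairs : List (Int × Int × Int)) (closing_point_index : Int) (passed_by_zero_index : Bool) (out : (List (Int × Int × Int)) × Int) : Decidable (Spec_clean_sewing_closing_pairs_dictionary dict_closing_pairs closing_point_index passed_by_zero_index out) := by unfold Spec_clean_sewing_closing_pairs_dictionary; infer_instance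

-- ===== CLAIM (what is proved, stated in full; the proofs are below) =====
def Claim_equal_clean_sewing_closing_pairs_dictionary : Prop := ∀ (dict_closing_pairs : List (Int × Int × Int)) (closing_point_index : Int) (passed_by_zero_index : Bool), Dom_clean_sewing_closing_pairs_dictionary dict_closing_pairs closing_point_index passed_by_zero_index → Pre_clean_sewing_closing_pairs_dictionary dict_closing_pairs closing_point_index passed_by_zero_index → Spec_clean_sewing_closing_pairs_dictionary dict_closing_pairs closing_point_index passed_by_zero_index (clean_sewing_closing_pairs_dictionary dict_closing_pairs closing_point_index passed_by_zero_index)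

-- ===== LEMMAS AND PROOFS =====

-- the common trailing-acceptance count, walking the reversed list of value[1]s (characterises A)
def pvCnt (prev cpi : Int) (pbz : Bool) : Int → List Int → Nat
  | last, rest =>
    if (!pbz && decide (last > cpi)) ||
       (pbz && decide ((0:Int) ≤ last) && decide (last ≤ prev) && decide (last > cpi)) then
      match rest with
      | [] => 1
      | x :: xs => 1 + pvCnt prev cpi pbz x xs
    else 0

theorem pvCnt_le (prev cpi : Int) (pbz : Bool) (last : Int) (rest : List Int) :
    pvCnt prev cpi pbz last rest ≤ rest.length + 1 := by
  induction rest generalizing last with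
  | nil => unfold pvCnt; split <;> simp
  | cons x xs ih =>
    unfold pvCnt; split
    · simpa [Nat.add_comm] using Nat.add_le_add_left (ih x) 1
    · simp

theorem pvCnt_neg (prev cpi : Int) (pbz : Bool) (last : Int) (rest : List Int)
    (h : ((!pbz && decide (last > cpi)) ||
      (pbz && decide ((0:Int) ≤ last) && decide (last ≤ prev) && decide (last > cpi))) = false) :
    pvCnt prev cpi pbz last rest = 0 := by
  conv_lhs => unfold pvCnt
  rw [h, if_neg (by simp)]

theorem pvCnt_pos_nil (prev cpi : Int) (pbz : Bool) (last : Int)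
    (h : ((!pbz && decide (last > cpi)) ||
      (pbz && decide ((0:Int) ≤ last) && decide (last ≤ prev) && decide (last > cpi))) = true) :
    pvCnt prev cpi pbz last [] = 1 := by
  conv_lhs => unfold pvCnt
  rw [h, if_pos rfl]

theorem pvCnt_pos_cons (prev cpi : Int) (pbz : Bool) (last x : Int) (xs : List Int)
    (h : ((!pbz && decide (last > cpi)) ||
      (pbz && decide ((0:Int) ≤ last) && decide (last ≤ prev) && decide (last > cpi))) = true) :
    pvCnt prev cpi pbz last (x :: xs) = 1 + pvCnt prev cpi pbz x xs := by
  conv_lhs => unfold pvCnt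
  rw [h, if_pos rfl]

-- A's step condition is B's pvCond
theorem pvCond_eq (cpi prev : Int) (pbz : Bool) (s : Int) :
    pvCond cpi prev pbz s =
      ((!pbz && decide (s > cpi)) ||
       (pbz && decide ((0:Int) ≤ s) && decide (s ≤ prev) && decide (s > cpi))) := by
  unfold pvCond
  cases pbz <;> by_cases h1 : s > cpi <;> by_cases h2 : (0:Int) ≤ s <;>
    by_cases h3 : s ≤ prev <;> simp [h1, h2, h3]

-- pvCnt is the takeWhile length over the reversed seconds
theorem pvCnt_takeWhile (prev cpi : Int) (pbz : Bool) (last : Int) (rest : List Int) :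
    pvCnt prev cpi pbz last rest =
      ((last :: rest).takeWhile (pvCond cpi prev pbz)).length := by
  induction rest generalizing last with
  | nil =>
    by_cases h : pvCond cpi prev pbz last
    · rw [pvCnt_pos_nil _ _ _ _ ((pvCond_eq cpi prev pbz last) ▸ h)]
      simp [List.takeWhile, h]
    · rw [pvCnt_neg _ _ _ _ _ (by rw [← pvCond_eq]; exact Bool.not_eq_true _ ▸ (by simpa using h))]
      simp [List.takeWhile, h]
  | cons x xs ih =>
    by_cases h : pvCond cpi prev pbz last
    · rw [pvCnt_pos_cons _ _ _ _ _ _ ((pvCond_eq cpi prev pbz last) ▸ h), ih]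
      simp [List.takeWhile, h]
      omega
    · rw [pvCnt_neg _ _ _ _ _ (by rw [← pvCond_eq]; simpa using h)]
      simp [List.takeWhile, h]

-- the second component of B's fold is the running index
theorem pvKeep_snd (cpi prev : Int) (pbz : Bool) (xs : List Int) :
    ∀ st : Nat × Nat, (xs.foldl (pvKeepStep cpi prev pbz) st).2 = st.2 + xs.length := by
  induction xs with
  | nil => intro st; simp
  | cons x xs ih =>
    intro st
    simp only [List.foldl_cons, ih]
    unfold pvKeepStep
    split <;> simp <;> omega

-- B's forward fold computes length minus the takeWhile length on the reverse
theorem pvKeep_fst (cpi prev : Int) (pbz : Bool) (xs : List Int) :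
    ∀ st : Nat × Nat, (xs.foldl (pvKeepStep cpi prev pbz) st).1 =
      if (xs.reverse.takeWhile (pvCond cpi prev pbz)).length = xs.length then st.1
      else st.2 + (xs.length - (xs.reverse.takeWhile (pvCond cpi prev pbz)).length) := by
  induction xs using List.reverseRecOn with
  | nil => intro st; simp
  | append_singleton xs x ih =>
    intro st
    have hle : (xs.reverse.takeWhile (pvCond cpi prev pbz)).length ≤ xs.length := by
      have := (List.takeWhile_sublist (l := xs.reverse) (p := pvCond cpi prev pbz)).length_le
      simpa using this
    rw [List.foldl_append]
    simp only [List.foldl_cons, List.foldl_nil, List.reverse_append, List.reverse_singleton,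
      List.singleton_append, List.length_append, List.length_singleton]
    have hstep_pos : ∀ y : Nat × Nat, pvCond cpi prev pbz x = true →
        pvKeepStep cpi prev pbz y x = (y.1, y.2 + 1) := by
      intro y hx; simp [pvKeepStep, hx]
    have hstep_neg : ∀ y : Nat × Nat, pvCond cpi prev pbz x = false →
        pvKeepStep cpi prev pbz y x = (y.2 + 1, y.2 + 1) := by
      intro y hx; simp [pvKeepStep, hx]
    by_cases h : pvCond cpi prev pbz x
    · rw [List.takeWhile_cons_of_pos h, hstep_pos _ h]
      simp only [List.length_cons, ih st]
      split_ifs <;> omega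
    · rw [List.takeWhile_cons_of_neg (by simpa using h),
        hstep_neg _ (by simpa using h)]
      simp only [List.length_nil, pvKeep_snd]
      rw [if_neg (by omega)]
      omega

theorem pvDelKey_append (pre suf : List (Int × Int × Int)) (x : Int × Int × Int)
    (h : x.1 ∉ pre.map Prod.fst) : pvDelKey (pre ++ x :: suf) x.1 = pre ++ suf := by
  induction pre with
  | nil => simp [pvDelKey]
  | cons y ys ih =>
    simp only [List.map_cons, List.mem_cons] at h
    push_neg at h
    simp [pvDelKey, Ne.symm h.1, ih h.2]

theorem pvFoldlDel (suf : List (Int × Int × Int)) : ∀ pre : List (Int × Int × Int),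
    ((pre ++ suf).map Prod.fst).Nodup →
    suf.foldl (fun acc kv => pvDelKey acc kv.1) (pre ++ suf) = pre := by
  induction suf with
  | nil => intro pre _; simp
  | cons x xs ih =>
    intro pre h
    have hx : x.1 ∉ pre.map Prod.fst := by
      simp only [List.map_append, List.nodup_append, List.map_cons] at h
      intro hm; exact h.2.2 _ hm _ (by simp) rfl
    have h' : ((pre ++ xs).map Prod.fst).Nodup := by
      simp only [List.map_append, List.map_cons] at h ⊢
      exact h.sublist ((List.append_sublist_append_left _).mpr (List.sublist_cons_self _ _))
    simp only [List.foldl_cons, pvDelKey_append pre xs x hx]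
    exact ih pre h'

theorem pvAloop_stuck (vals : List (Int × Int)) (prev cpi : Int) (pbz : Bool)
    (last : Int) (hc : ((!pbz && decide (last > cpi)) ||
      (pbz && decide ((0:Int) ≤ last) && decide (last ≤ prev) && decide (last > cpi))) = false) :
    ∀ (ks : List Int) (i : Nat) (d : List (Int × Int × Int)) (lower : Option Int),
    pvAloop vals prev cpi pbz i ks d last lower = (d, lower) := by
  intro ks
  induction ks with
  | nil => intro i d lower; simp [pvAloop]
  | cons k ks ih => intro i d lower; simp only [pvAloop, hc]; simp [ih]

theorem pvGetIdx {α : Type} (l : List α) {i k : Nat} (hik : i = k) (hi : i < l.length) :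
    l[i]'hi = l[k]'(hik ▸ hi) := by subst hik; rfl

theorem pvAloop_eq (d : List (Int × Int × Int)) (prev cpi : Int) (pbz : Bool)
    (hnd : (d.map (·.1)).Nodup) :
    ∀ (m j : Nat) (last : Int) (lower : Option Int), j < d.length → m = d.length - j →
    pvAloop (d.map (·.2)) prev cpi pbz j (((d.map (·.1)).reverse).drop j)
        (d.take (d.length - j)) last lower =
      (d.take (d.length - j - pvCnt prev cpi pbz last
          (((d.map (·.2.2)).reverse).drop (j + 1))),
       if pvCnt prev cpi pbz last (((d.map (·.2.2)).reverse).drop (j + 1)) = 0 then lower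
       else some ((d.getD (d.length - j - pvCnt prev cpi pbz last
          (((d.map (·.2.2)).reverse).drop (j + 1))) (0, 0, 0)).1)) := by
  intro m
  induction m with
  | zero => intro j last lower hj hm; omega
  | succ m ih =>
    intro j last lower hj hm
    have hjr : j < ((d.map (·.1)).reverse).length := by simp; omega
    have hkey : ((d.map (·.1)).reverse).drop j =
        (d[d.length - 1 - j]'(by omega)).1 :: ((d.map (·.1)).reverse).drop (j + 1) := by
      rw [List.drop_eq_getElem_cons hjr, List.getElem_reverse, List.getElem_map]
      simp only [List.length_map]
    rw [hkey]
    unfold pvAloop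
    by_cases hc : ((!pbz && decide (last > cpi)) ||
        (pbz && decide ((0:Int) ≤ last) && decide (last ≤ prev) && decide (last > cpi))) = true
    · simp only [hc, if_true]
      -- the current dict take (len-j) ends with the entry d[len-1-j]
      have htake : d.take (d.length - j) =
          d.take (d.length - 1 - j) ++ [d[d.length - 1 - j]'(by omega)] := by
        rw [show d.length - j = (d.length - 1 - j) + 1 from by omega, List.take_add_one,
          List.getElem?_eq_getElem (by omega)]
        simp
      have hnotin : (d[d.length - 1 - j]'(by omega)).1 ∉
          (d.take (d.length - 1 - j)).map (·.1) := by
        have hsub : ((d.take (d.length - j)).map (·.1)).Nodup := by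
          rw [List.map_take]
          exact hnd.sublist (List.take_sublist _ _)
        rw [htake, List.map_append] at hsub
        intro hm2
        exact (List.disjoint_of_nodup_append hsub) hm2 (by simp)
      have hdel : pvDelKey (d.take (d.length - j)) (d[d.length - 1 - j]'(by omega)).1 =
          d.take (d.length - 1 - j) := by
        rw [htake]
        have := pvDelKey_append (d.take (d.length - 1 - j)) [] (d[d.length - 1 - j]'(by omega))
          hnotin
        simpa using this
      rw [hdel]
      by_cases hemp : d.take (d.length - 1 - j) = []
      · -- the dict was emptied: Python breaks
        have hj1 : j = d.length - 1 := by
          rw [List.take_eq_nil_iff] at hemp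
          rcases hemp with h | h
          · omega
          · rw [h] at hj; simp at hj
        have hdropnil : ((d.map (·.2.2)).reverse).drop (j + 1) = [] := by
          apply List.drop_eq_nil_of_le; simp; omega
        rw [hdropnil, pvCnt_pos_nil prev cpi pbz last hc, if_pos hemp, if_neg one_ne_zero]
        rw [show d.length - j - 1 = d.length - 1 - j from by omega,
          List.getD_eq_getElem _ _ (by omega)]
      · rw [if_neg hemp]
        have hj1 : j + 1 < d.length := by
          by_contra hge
          exact hemp (List.take_eq_nil_iff.mpr (Or.inl (by omega)))
        -- the frozen-snapshot next value values[-j-2][1] is seconds.reverse[j+1]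
        have hget : PySem.List.pyGet? (d.map (·.2)) (-(j : Int) - 2) =
            some ((d.map (·.2))[d.length - (j + 2)]'(by simp only [List.length_reverse, List.length_map]; omega)) := by
          rw [show (-(j : Int) - 2) = -(((j + 2 : Nat)) : Int) from by push_cast; ring,
            PySem.List.pyGet?_neg_natCast (d.map (·.2)) (j + 2) (by omega) (by simp only [List.length_reverse, List.length_map]; omega),
            List.getElem?_eq_getElem (by simp only [List.length_reverse, List.length_map]; omega)]
          simp
        have hsec : ((d.map (·.2))[d.length - (j + 2)]'(by simp only [List.length_reverse, List.length_map]; omega)).2 =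
            ((d.map (·.2.2)).reverse)[j + 1]'(by simp only [List.length_reverse, List.length_map]; omega) := by
          simp only [List.getElem_reverse, List.getElem_map, List.length_map]
          exact congrArg (fun p => p.2.2) (pvGetIdx d (show d.length - (j + 2) = d.length - 1 - (j + 1) by omega) (by omega))
        have hdrop : ((d.map (·.2.2)).reverse).drop (j + 1) =
            (((d.map (·.2.2)).reverse)[j + 1]'(by simp only [List.length_reverse, List.length_map]; omega)) ::
              ((d.map (·.2.2)).reverse).drop (j + 1 + 1) := by
          rw [List.drop_eq_getElem_cons (by simp only [List.length_reverse, List.length_map]; omega)]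
        rw [hget]
        simp only [Option.getD_some, hsec]
        have hrec := ih (j + 1) (((d.map (·.2.2)).reverse)[j + 1]'(by simp only [List.length_reverse, List.length_map]; omega))
          (some (d[d.length - 1 - j]'(by omega)).1) (by omega) (by omega)
        rw [show d.length - (j + 1) = d.length - 1 - j from by omega] at hrec
        rw [hrec, hdrop, pvCnt_pos_cons prev cpi pbz last _ _ hc]
        have hle := pvCnt_le prev cpi pbz
          (((d.map (·.2.2)).reverse)[j + 1]'(by simp only [List.length_reverse, List.length_map]; omega))
          (((d.map (·.2.2)).reverse).drop (j + 1 + 1))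
        set c := pvCnt prev cpi pbz (((d.map (·.2.2)).reverse)[j + 1]'(by simp only [List.length_reverse, List.length_map]; omega))
          (((d.map (·.2.2)).reverse).drop (j + 1 + 1)) with hcdef
        have hlen : (((d.map (·.2.2)).reverse).drop (j + 1 + 1)).length + 1 =
            d.length - j - 1 := by simp; omega
        rw [hlen] at hle
        refine Prod.ext ?_ ?_
        · show d.take (d.length - 1 - j - c) = d.take (d.length - j - (1 + c))
          rw [show d.length - 1 - j - c = d.length - j - (1 + c) from by omega]
        · show (if c = 0 then some (d[d.length - 1 - j]'(by omega)).1
              else some ((d.getD (d.length - 1 - j - c) (0, 0, 0)).1)) =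
            if 1 + c = 0 then lower
              else some ((d.getD (d.length - j - (1 + c)) (0, 0, 0)).1)
          rw [if_neg (by omega : ¬ (1 + c = 0)),
            show d.length - j - (1 + c) = d.length - 1 - j - c from by omega]
          by_cases hc0 : c = 0
          · rw [if_pos hc0, hc0, Nat.sub_zero, List.getD_eq_getElem _ _ (by omega)]
          · rw [if_neg hc0]
    · rw [Bool.not_eq_true] at hc
      simp only [hc, Bool.false_eq_true, if_false]
      rw [pvAloop_stuck _ _ _ _ _ hc, pvCnt_neg prev cpi pbz last _ hc]
      simp

-- ===== VERDICT (by name: the statement is the Claim_ definition above) =====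
theorem clean_sewing_closing_pairs_dictionary_spec : Claim_equal_clean_sewing_closing_pairs_dictionary := by
  intro d cpi pbz _ hpre
  obtain ⟨hnd, hne, hgt, hpz⟩ := hpre
  unfold Spec_clean_sewing_closing_pairs_dictionary
  have hlen : 0 < d.length := List.length_pos_of_ne_nil hne
  have hlast : d.getLast? = some (d.getLast hne) := List.getLast?_eq_getLast hne
  have hgt' : (d.getLast hne).2.2 > cpi := by
    rw [List.getLastD_eq_getLast?, hlast] at hgt; simpa using hgt
  have hpz' : pbz = true → 0 ≤ (d.getLast hne).2.2 := by
    rw [List.getLastD_eq_getLast?, hlast] at hpz; simpa using hpz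
  have hc0 : ((!pbz && decide ((d.getLast hne).2.2 > cpi)) ||
      (pbz && decide ((0:Int) ≤ (d.getLast hne).2.2) &&
        decide ((d.getLast hne).2.2 ≤ (d.getLast hne).2.2) &&
        decide ((d.getLast hne).2.2 > cpi))) = true := by
    cases pbz
    · simp [hgt']
    · simp [hgt', hpz' rfl]
  set prev := (d.getLast hne).2.2 with hprev
  set rev : List Int := (d.map (·.2.2)).reverse with hrev
  have hrevlen : rev.length = d.length := by simp [hrev]
  have hrevne : rev ≠ [] := by
    intro h; rw [h] at hrevlen; simp at hrevlen; omega
  have hh : rev.head? = some prev := by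
    rw [hrev, List.head?_reverse, List.getLast?_map, hlast]
    rfl
  have hhead : rev = prev :: rev.drop 1 := by
    cases hr : rev with
    | nil => exact absurd hr hrevne
    | cons a t =>
      rw [hr] at hh
      simp only [List.head?_cons, Option.some.injEq] at hh
      simp [hh]
  have hk1 : 1 ≤ pvCnt prev cpi pbz prev (rev.drop 1) := by
    cases hrest : rev.drop 1 with
    | nil => rw [pvCnt_pos_nil _ _ _ _ hc0]
    | cons x xs => rw [pvCnt_pos_cons _ _ _ _ _ _ hc0]; omega
  have hkn : pvCnt prev cpi pbz prev (rev.drop 1) ≤ d.length := by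
    have h1 := pvCnt_le prev cpi pbz prev (rev.drop 1)
    have h2 : (rev.drop 1).length = d.length - 1 := by simp [hrevlen]
    omega
  set c := pvCnt prev cpi pbz prev (rev.drop 1) with hcdef
  have hk0 : ¬ (c = 0) := by omega
  have hv1 : PySem.List.pyGet? (d.map (·.2)) (-1) = some ((d.getLast hne).2) := by
    simp [PySem.List.pyGet?_neg_one, List.getLast?_map, hlast]
  have hd1 : PySem.List.pyGet? d (-1) = some (d.getLast hne) := by
    simp [PySem.List.pyGet?_neg_one, hlast]
  -- A's side
  have hAl := pvAloop_eq d prev cpi pbz hnd d.length 0 prev none hlen (by omega)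
  simp only [List.drop_zero, Nat.sub_zero, List.take_length, Nat.zero_add, ← hrev, ← hcdef] at hAl
  -- B's keep equals d.length - c
  have hkeepfold := pvKeep_fst cpi prev pbz (d.map (·.2.2)) (0, 0)
  have htw : ((d.map (·.2.2)).reverse.takeWhile (pvCond cpi prev pbz)).length = c := by
    rw [hcdef, pvCnt_takeWhile, ← hhead]
  rw [← hrev] at hkeepfold
  rw [htw] at hkeepfold
  have hkeep : ((d.map (·.2.2)).foldl (pvKeepStep cpi prev pbz) (0, 0)).1 = d.length - c := by
    rw [hkeepfold]
    by_cases hceq : c = (d.map (·.2.2)).length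
    · rw [if_pos (by simpa using hceq)]
      simp at hceq
      omega
    · rw [if_neg (by simpa using hceq)]
      simp
  -- deletion fold
  have hF := pvFoldlDel (d.drop (d.length - c)) (d.take (d.length - c))
    (by rw [List.take_append_drop]; exact hnd)
  rw [List.take_append_drop] at hF
  have hgd : d[d.length - c]? = some (d[d.length - c]'(by omega)) :=
    List.getElem?_eq_getElem (by omega)
  simp only [clean_sewing_closing_pairs_dictionary, clean_sewing_closing_pairs_dictionary_alt,
    hv1, hd1, PySem.List.slice?_none_none_neg_one, Option.getD_some]
  rw [hAl, if_neg hk0]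
  have hfm : List.foldl (fun st (kv : Int × Int × Int) => pvKeepStep cpi prev pbz st kv.2.2)
      ((0, 0) : Nat × Nat) d = (d.map (·.2.2)).foldl (pvKeepStep cpi prev pbz) (0, 0) :=
    List.foldl_map.symm
  rw [← hprev, hfm, hkeep, hgd, hF]
  rw [List.getD_eq_getElem _ _ (by omega)]
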